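-- pv_equiv track=rewrite | github.com/ITI/pcesbld | xlsxPCES/convert/convert-ipmap.py | cleanRow
-- ===== SOURCE A (Python) =====
-- def cleanRow(row):
--     rtn = []
--     for r in row:
--         if r.startswith('#!'):
--             r = ''
--         elif len(rtn) > 0 and r.startswith('#'):
--             break
--         rtn.append(r.strip())
--
--     return rtn
-- ===== SOURCE B (Python) =====
-- def cleanRow(row):
--     j = next((i for i, r in enumerate(row)
--               if i > 0 and r.startswith('#') and not r.startswith('#!')),
--              len(row))
--     return ['' if r.startswith('#!') else r.strip() for r in row[:j]]
-- ===== Notes on version B (the rewrite author's own statement) =====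
-- stated objective: alternative
-- what changed: Replaces A's single accumulate-and-break loop by two passes: first find the truncation index j (first position >0 whose cell starts with '#' but not '#!'), then map strip/blank over the prefix row[:j].
import Mathlib
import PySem

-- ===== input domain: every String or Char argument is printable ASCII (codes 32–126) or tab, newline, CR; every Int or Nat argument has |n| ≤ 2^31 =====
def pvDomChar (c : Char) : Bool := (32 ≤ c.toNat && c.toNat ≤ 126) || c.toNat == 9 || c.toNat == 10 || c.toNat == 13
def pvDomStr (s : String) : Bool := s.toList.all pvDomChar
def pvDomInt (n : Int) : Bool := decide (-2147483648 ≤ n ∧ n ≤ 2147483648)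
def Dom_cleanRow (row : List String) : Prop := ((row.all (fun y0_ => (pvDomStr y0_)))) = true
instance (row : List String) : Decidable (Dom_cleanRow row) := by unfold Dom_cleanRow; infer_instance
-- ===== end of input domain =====

-- B splits A's accumulate-and-break loop into a cutoff-index search followed by a map over the prefix (alternative decomposition, same cost).

-- ===== PORT A =====
-- the for-loop with break and accumulator rtn, transcribed as structural recursion over the row
def cleanRowLoop : List String → List String → List String
  | [], rtn => rtn
  | r :: rs, rtn =>
    if PySem.Str.startswith r "#!" then
      cleanRowLoop rs (rtn ++ [PySem.Str.strip ""])
    else if decide (rtn.length > 0) && PySem.Str.startswith r "#" then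
      rtn
    else
      cleanRowLoop rs (rtn ++ [PySem.Str.strip r])

def cleanRow (row : List String) : List String := cleanRowLoop row []

-- ===== PORT B =====
-- j = next((i for i,r in enumerate(row) if i>0 and r.startswith('#') and not r.startswith('#!')), len(row));
-- then row[:j] mapped; row[:j] with 0 ≤ j is List.take j row (exact)
def cleanRow_alt (row : List String) : List String :=
  let j : Nat :=
    match (PySem.List.enumerate row).find?
        (fun p => decide (p.1 > 0) && PySem.Str.startswith p.2 "#" && !PySem.Str.startswith p.2 "#!") with
    | some p => p.1.toNat
    | none => row.length
  (List.take j row).map (fun r => if PySem.Str.startswith r "#!" then "" else PySem.Str.strip r)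

-- ===== PRECONDITION & SPEC =====
def Spec_cleanRow (row : List String) (out : List String) : Prop := out = cleanRow_alt row
instance (row : List String) (out : List String) : Decidable (Spec_cleanRow row out) := by unfold Spec_cleanRow; infer_instance

-- ===== CLAIM (what is proved, stated in full; the proofs are below) =====
def Claim_equal_cleanRow : Prop := ∀ (row : List String), Dom_cleanRow row → Spec_cleanRow row (cleanRow row)

-- ===== LEMMAS AND PROOFS =====

-- the per-cell transform and the cutoff predicate, shared by the proofs
def pvF (r : String) : String := if PySem.Str.startswith r "#!" then "" else PySem.Str.strip r
def pvP (r : String) : Bool := PySem.Str.startswith r "#" && !PySem.Str.startswith r "#!"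
def pvPred (p : Int × String) : Bool :=
  decide (p.1 > 0) && PySem.Str.startswith p.2 "#" && !PySem.Str.startswith p.2 "#!"

lemma loop_char (rs : List String) : ∀ rtn : List String, rtn ≠ [] →
    cleanRowLoop rs rtn = rtn ++ (rs.takeWhile (fun x => !pvP x)).map pvF := by
  induction rs with
  | nil => intro rtn _; simp [cleanRowLoop]
  | cons r rs ih =>
    intro rtn hne
    by_cases h1 : PySem.Chars.startswith r.toList ['#', '!'] = true
    · have hP : pvP r = false := by simp [pvP, h1]
      simp only [cleanRowLoop]
      rw [if_pos (by simp [h1])]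
      rw [ih (rtn ++ [PySem.Str.strip ""]) (by simp)]
      have hstrip : PySem.Str.strip "" = "" := by decide
      rw [hstrip]
      simp [List.takeWhile_cons, hP, pvF, h1]
    · have hlen : decide (rtn.length > 0) = true := by
        simp [List.length_pos_iff]; exact hne
      by_cases h2 : PySem.Chars.startswith r.toList ['#'] = true
      · have hP : pvP r = true := by simp [pvP, h1, h2]
        simp only [cleanRowLoop]
        rw [if_neg (by simp [h1]), if_pos (by simp [hlen, h2])]
        simp [List.takeWhile_cons, hP]
      · have hP : pvP r = false := by simp [pvP, h2]
        simp only [cleanRowLoop]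
        rw [if_neg (by simp [h1]), if_neg (by simp [h2])]
        rw [ih (rtn ++ [PySem.Str.strip r]) (by simp)]
        simp [List.takeWhile_cons, hP, pvF, h1]

lemma find_enum_ge (xs : List String) : ∀ (t : Int) (p : Int × String),
    (PySem.List.enumerate xs t).find? pvPred = some p → t ≤ p.1 := by
  induction xs with
  | nil => intro t p h; simp [PySem.List.enumerate_nil] at h
  | cons x xs ih =>
    intro t p h
    rw [PySem.List.enumerate_cons] at h
    by_cases hx : pvPred (t, x) = true
    · rw [List.find?_cons_of_pos hx] at h
      cases h; rfl
    · rw [List.find?_cons_of_neg (by simp [hx]) ] at h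
      have := ih (t + 1) p h
      omega

lemma takeJ (xs : List String) : ∀ (s : Nat), 1 ≤ s →
    List.take ((match (PySem.List.enumerate xs (s : Int)).find? pvPred with
                | some p => p.1.toNat
                | none => s + xs.length) - s) xs
      = xs.takeWhile (fun x => !pvP x) := by
  induction xs with
  | nil => intro s _; simp [PySem.List.enumerate_nil]
  | cons x xs ih =>
    intro s hs
    rw [PySem.List.enumerate_cons]
    have hpred : pvPred ((s : Int), x) = pvP x := by
      have hpos : decide (((s : Nat) : Int) > 0) = true := by
        simp only [decide_eq_true_eq]; exact_mod_cast hs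
      simp only [pvPred, pvP, hpos, Bool.true_and]
    by_cases hx : pvP x = true
    · rw [List.find?_cons_of_pos (by rw [hpred]; exact hx)]
      simp [List.takeWhile_cons, hx]
    · rw [List.find?_cons_of_neg (by rw [hpred]; simp [hx])]
      have hcast : ((s : Int) + 1) = ((s + 1 : Nat) : Int) := by push_cast; ring
      rw [hcast]
      cases hfind : (PySem.List.enumerate xs ((s + 1 : Nat) : Int)).find? pvPred with
      | none =>
        have hih := ih (s + 1) (by omega)
        rw [hfind] at hih
        simp only at hih
        have harith : s + (x :: xs).length - s = (s + 1 + xs.length - (s + 1)) + 1 := by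
          simp only [List.length_cons]; omega
        simp only [harith, List.take_succ_cons, hih]
        simp [List.takeWhile_cons, hx]
      | some p =>
        have hge : ((s + 1 : Nat) : Int) ≤ p.1 := find_enum_ge xs _ p hfind
        have hih := ih (s + 1) (by omega)
        rw [hfind] at hih
        simp only at hih
        have harith : p.1.toNat - s = (p.1.toNat - (s + 1)) + 1 := by omega
        simp only [harith, List.take_succ_cons, hih]
        simp [List.takeWhile_cons, hx]

lemma pvF_eq :
    (fun r => if PySem.Str.startswith r "#!" then "" else PySem.Str.strip r) = pvF := rfl

lemma alt_char (r : String) (rs : List String) :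
    cleanRow_alt (r :: rs) = pvF r :: (rs.takeWhile (fun x => !pvP x)).map pvF := by
  have hlam : (fun p : Int × String => decide (p.1 > 0) && PySem.Str.startswith p.2 "#" &&
      !PySem.Str.startswith p.2 "#!") = pvPred := rfl
  have h0 : pvPred ((0 : Int), r) = false := by simp [pvPred]
  have hfind0 : (PySem.List.enumerate (r :: rs)).find? pvPred
      = (PySem.List.enumerate rs ((1 : Nat) : Int)).find? pvPred := by
    rw [PySem.List.enumerate, List.find?_cons_of_neg (by simp [h0])]
    norm_num
  have hJ := takeJ rs 1 (le_refl 1)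
  simp only [cleanRow_alt, hlam, hfind0]
  cases hfind : (PySem.List.enumerate rs ((1 : Nat) : Int)).find? pvPred with
  | none =>
    rw [hfind] at hJ
    simp only at hJ ⊢
    rw [show (r :: rs).length = rs.length + 1 from by simp, List.take_succ_cons, List.map_cons]
    rw [show rs.length = 1 + rs.length - 1 from by omega, hJ, pvF_eq]
    rfl
  | some p =>
    rw [hfind] at hJ
    simp only at hJ ⊢
    have hge : ((1 : Nat) : Int) ≤ p.1 := find_enum_ge rs _ p hfind
    rw [show p.1.toNat = (p.1.toNat - 1) + 1 from by omega, List.take_succ_cons, List.map_cons]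
    rw [hJ, pvF_eq]
    rfl

-- ===== VERDICT (by name: the statement is the Claim_ definition above) =====
theorem cleanRow_spec : Claim_equal_cleanRow := by
  intro row _
  unfold Spec_cleanRow
  cases row with
  | nil => rfl
  | cons r rs =>
    rw [alt_char]
    by_cases h1 : PySem.Chars.startswith r.toList ['#', '!'] = true
    · have hstrip : PySem.Str.strip "" = "" := by decide
      simp only [cleanRow, cleanRowLoop]
      rw [if_pos (by simp [h1]), hstrip, List.nil_append]
      rw [loop_char rs [""] (by simp)]
      simp [pvF, h1]
    · simp only [cleanRow, cleanRowLoop]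
      rw [if_neg (by simp [h1]),
        if_neg (by simp)]
      rw [List.nil_append, loop_char rs [PySem.Str.strip r] (by simp)]
      simp [pvF, h1]
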